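-- pv_equiv track=rewrite | github.com/haris314/book-review | extraLogic.py | shouldBePreFormatted
-- ===== SOURCE A (Python) =====
-- def shouldBePreFormatted(text):
--
--     #Just check if there are spaces after new lines
--     startingSpaces = 0
--     newLine = True
--
--     for ch in text:
--
--         if ch is '\n':
--             newLine = True
--
--         elif newLine:
--
--             if ch is ' ' or ch is '\t':
--                 startingSpaces += 1
--
--             newLine = False
--
--     if startingSpaces >= 4:
--         return True
--     else:
--         return False
-- ===== SOURCE B (Python) =====
-- def shouldBePreFormatted(text):
--     count = sum(1 for line in text.split('\n') if line[:1] in (' ', '\t'))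
--     return count >= 4
-- ===== Notes on version B (the rewrite author's own statement) =====
-- stated objective: simpler
-- what changed: Replaces the character-by-character state machine (newline flag + counter) with a split of the text into lines and a count of lines whose first character is a space or tab.
import Mathlib
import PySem

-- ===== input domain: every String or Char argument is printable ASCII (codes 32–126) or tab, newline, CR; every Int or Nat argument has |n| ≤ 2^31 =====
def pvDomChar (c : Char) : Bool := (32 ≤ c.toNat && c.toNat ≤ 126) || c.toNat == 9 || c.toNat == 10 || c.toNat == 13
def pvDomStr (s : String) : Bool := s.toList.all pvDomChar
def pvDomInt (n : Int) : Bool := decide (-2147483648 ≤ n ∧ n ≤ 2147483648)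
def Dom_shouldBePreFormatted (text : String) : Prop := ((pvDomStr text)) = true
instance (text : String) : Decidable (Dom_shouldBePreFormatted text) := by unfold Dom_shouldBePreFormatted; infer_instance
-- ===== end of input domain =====

-- B replaces A's character-by-character state machine with split('\n') + a count of
-- lines starting with a space or tab (objective: simpler).

-- ===== PORT A =====
-- the loop body: state is (startingSpaces, newLine)
def pvStepA (st : Nat × Bool) (ch : Char) : Nat × Bool :=
  if ch = '\n' then (st.1, true)
  else if st.2 then
    (if ch = ' ' ∨ ch = '\t' then st.1 + 1 else st.1, false)
  else st

def shouldBePreFormatted (text : String) : Bool :=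
  let r := text.toList.foldl pvStepA (0, true)
  if 4 ≤ r.1 then true else false

-- ===== PORT B =====
-- line[:1] in (' ', '\t')
def pvIndented (line : List Char) : Bool := line.take 1 = [' '] || line.take 1 = ['\t']

def shouldBePreFormatted_alt (text : String) : Bool :=
  decide (4 ≤ ((text.toList.splitOn '\n').countP pvIndented))

-- ===== PRECONDITION & SPEC =====
def Spec_shouldBePreFormatted (text : String) (out : Bool) : Prop := out = shouldBePreFormatted_alt text
instance (text : String) (out : Bool) : Decidable (Spec_shouldBePreFormatted text out) := by unfold Spec_shouldBePreFormatted; infer_instance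

-- ===== CLAIM (what is proved, stated in full; the proofs are below) =====
def Claim_equal_shouldBePreFormatted : Prop := ∀ (text : String), Dom_shouldBePreFormatted text → Spec_shouldBePreFormatted text (shouldBePreFormatted text)

-- ===== LEMMAS AND PROOFS =====

theorem pvFold_key (l : List Char) : ∀ (b : Bool) (n : Nat),
    (l.foldl pvStepA (n, b)).1 =
      n + (if b then (l.splitOnP (· == '\n')).countP pvIndented
           else ((l.splitOnP (· == '\n')).tail).countP pvIndented) := by
  induction l with
  | nil =>
      intro b n
      cases b <;> simp [List.splitOnP_nil, List.countP, List.countP.go, pvIndented]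
  | cons c rest ih =>
      intro b n
      obtain ⟨h, t, hht⟩ : ∃ h t, rest.splitOnP (· == '\n') = h :: t := by
        cases hr : rest.splitOnP (· == '\n') with
        | nil => exact absurd hr (List.splitOnP_ne_nil _ _)
        | cons h t => exact ⟨h, t, rfl⟩
      by_cases hc : c = '\n'
      · subst hc
        cases b <;>
          simp [List.foldl_cons, pvStepA, ih, List.splitOnP_cons, hht,
            pvIndented]
      · have hsplit : (c :: rest).splitOnP (· == '\n') = (c :: h) :: t := by
          simp [List.splitOnP_cons, hc, hht]
        cases b with
        | false =>
            simp [List.foldl_cons, pvStepA, hc, ih, hsplit, hht]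
        | true =>
            by_cases hw : c = ' ' ∨ c = '\t'
            · have hp : pvIndented (c :: h) = true := by
                rcases hw with h1 | h1 <;> simp [pvIndented, h1]
              simp [List.foldl_cons, pvStepA, hc, hw, ih, hsplit, hht, hp]
              omega
            · have hp : pvIndented (c :: h) = false := by
                simp [pvIndented]
                constructor <;> rintro rfl <;> simp_all
              simp [List.foldl_cons, pvStepA, hc, hw, ih, hsplit, hht, hp]

-- ===== VERDICT (by name: the statement is the Claim_ definition above) =====
theorem shouldBePreFormatted_spec : Claim_equal_shouldBePreFormatted := by
  intro text _
  unfold Spec_shouldBePreFormatted shouldBePreFormatted shouldBePreFormatted_alt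
  have h := pvFold_key text.toList true 0
  simp only [if_true, Nat.zero_add] at h
  simp only [h]
  by_cases h4 : 4 ≤ List.countP pvIndented (List.splitOnP (fun x => x == '\n') text.toList) <;>
    simp [h4, List.splitOn]
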